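-- pv_equiv track=rewrite | github.com/unknownseed/biubiutab | services/ai/formatters.py | _slice_lyrics_beats
-- ===== SOURCE A (Python) =====
-- def _slice_lyrics_beats(lyrics_beats: list[str | None], start: int, length: int) -> list[str | None]:
--     out: list[str | None] = []
--     for i in range(length):
--         idx = start + i
--         if 0 <= idx < len(lyrics_beats):
--             out.append(lyrics_beats[idx])
--         else:
--             out.append(None)
--     return out
-- ===== SOURCE B (Python) =====
-- def _slice_lyrics_beats(lyrics_beats, start, length):
--     if length <= 0:
--         return []
--     n = len(lyrics_beats)
--     lo = max(start, 0)
--     hi = min(start + length, n)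
--     valid = lyrics_beats[lo:hi] if lo < hi else []
--     left = max(0, min(length, -start))
--     right = length - left - len(valid)
--     return [None] * left + valid + [None] * right
-- ===== Notes on version B (the rewrite author's own statement) =====
-- stated objective: simpler
-- what changed: Replaces the per-index loop with a guarded append by an up-front computation of the overlap window [lo,hi) of [start,start+length) with the list bounds: one slice plus two None-padding blocks.
import Mathlib
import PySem

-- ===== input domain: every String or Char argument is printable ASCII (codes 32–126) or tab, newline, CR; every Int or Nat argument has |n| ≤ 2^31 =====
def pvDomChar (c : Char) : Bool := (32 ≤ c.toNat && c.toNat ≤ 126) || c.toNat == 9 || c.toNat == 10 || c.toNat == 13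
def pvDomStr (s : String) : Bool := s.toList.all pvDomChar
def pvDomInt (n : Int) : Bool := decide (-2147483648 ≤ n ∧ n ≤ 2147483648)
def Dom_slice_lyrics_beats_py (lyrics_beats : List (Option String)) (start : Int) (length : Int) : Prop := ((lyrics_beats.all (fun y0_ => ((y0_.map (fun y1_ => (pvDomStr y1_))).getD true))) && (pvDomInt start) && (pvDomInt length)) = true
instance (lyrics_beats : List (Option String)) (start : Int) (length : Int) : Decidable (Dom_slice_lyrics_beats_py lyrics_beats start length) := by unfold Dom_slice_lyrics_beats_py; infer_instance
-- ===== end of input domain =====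

-- B computes the overlap window up front: one slice plus two None-padding blocks, instead
-- of A's guarded per-index append loop (objective: simpler).

-- ===== PORT A =====
def slice_lyrics_beats_py (lyrics_beats : List (Option String)) (start : Int) (length : Int) : List (Option String) :=
  (PySem.List.pyRange 0 length 1).foldl
    (fun out i =>
      let idx := start + i
      if 0 ≤ idx ∧ idx < (lyrics_beats.length : Int) then
        out ++ [PySem.List.pyGetD lyrics_beats idx none]
      else
        out ++ [none])
    []

-- ===== PORT B =====
def slice_lyrics_beats_py_alt (lyrics_beats : List (Option String)) (start : Int) (length : Int) : List (Option String) :=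
  if length ≤ 0 then []
  else
    let n : Int := lyrics_beats.length
    let lo := max start 0
    let hi := min (start + length) n
    let valid := if lo < hi then PySem.List.slice lyrics_beats (some lo) (some hi) else []
    let left := max 0 (min length (-start))
    let right := length - left - (valid.length : Int)
    List.replicate left.toNat none ++ valid ++ List.replicate right.toNat none

-- ===== PRECONDITION & SPEC =====
def Spec_slice_lyrics_beats_py (lyrics_beats : List (Option String)) (start : Int) (length : Int) (out : List (Option String)) : Prop := out = slice_lyrics_beats_py_alt lyrics_beats start length
instance (lyrics_beats : List (Option String)) (start : Int) (length : Int) (out : List (Option String)) : Decidable (Spec_slice_lyrics_beats_py lyrics_beats start length out) := by unfold Spec_slice_lyrics_beats_py; infer_instance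

-- ===== CLAIM (what is proved, stated in full; the proofs are below) =====
def Claim_equal_slice_lyrics_beats_py : Prop := ∀ (lyrics_beats : List (Option String)) (start : Int) (length : Int), Dom_slice_lyrics_beats_py lyrics_beats start length → Spec_slice_lyrics_beats_py lyrics_beats start length (slice_lyrics_beats_py lyrics_beats start length)

-- ===== LEMMAS AND PROOFS =====

theorem foldl_append_ite {α β : Type} (p : α → Prop) [DecidablePred p] (f g : α → β)
    (l : List α) (acc : List β) :
    l.foldl (fun acc x => if p x then acc ++ [f x] else acc ++ [g x]) acc
      = acc ++ l.map (fun x => if p x then f x else g x) := by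
  induction l generalizing acc with
  | nil => simp
  | cons a l ih =>
    simp only [List.foldl_cons, List.map_cons]
    split_ifs <;> simp [ih]

theorem slice_A_eq_map (xs : List (Option String)) (start : Int) (m : Nat) :
    slice_lyrics_beats_py xs start (m : Int) =
      (List.range m).map (fun (k : Nat) =>
        if 0 ≤ start + (k : Int) ∧ start + (k : Int) < (xs.length : Int) then
          PySem.List.pyGetD xs (start + (k : Int)) none
        else (none : Option String)) := by
  simp only [slice_lyrics_beats_py]
  rw [PySem.List.pyRange_zero_natCast]
  rw [foldl_append_ite (fun i : Int => 0 ≤ start + i ∧ start + i < (xs.length : Int))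
      (fun i : Int => PySem.List.pyGetD xs (start + i) none) (fun _ => none)]
  rw [List.nil_append, List.map_map]
  rfl

theorem slice_spec_aux (xs : List (Option String)) (start : Int) (m : Nat) :
    slice_lyrics_beats_py xs start (m : Int) = slice_lyrics_beats_py_alt xs start (m : Int) := by
  rw [slice_A_eq_map]
  rcases Nat.eq_zero_or_pos m with rfl | hm
  · simp [slice_lyrics_beats_py_alt]
  have hnle : ¬ ((m : Int) ≤ 0) := by exact_mod_cast Nat.not_le.mpr hm
  simp only [slice_lyrics_beats_py_alt, if_neg hnle]
  set n : Nat := xs.length with hn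
  set lo : Int := max start 0 with hlo
  set hi : Int := min (start + (m : Int)) (n : Int) with hhi
  set left : Int := max 0 (min (m : Int) (-start)) with hleft
  by_cases hval : lo < hi
  · rw [if_pos hval]
    have h0lo : 0 ≤ lo := le_max_right _ _
    have h0hi : 0 ≤ hi := le_of_lt (lt_of_le_of_lt h0lo hval)
    rw [PySem.List.slice_toNat xs h0lo h0hi]
    have hhin : hi.toNat ≤ n := by omega
    have hlon : lo.toNat < n := by omega
    have hvlen : ((xs.drop lo.toNat).take (hi.toNat - lo.toNat)).length = hi.toNat - lo.toNat := by
      simp; omega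
    rw [List.append_assoc]
    apply List.ext_getElem
    · simp only [List.length_map, List.length_range, List.length_append,
        List.length_replicate, hvlen]
      omega
    · intro k hk1 hk2
      simp only [List.length_map, List.length_range] at hk1
      simp only [List.getElem_map, List.getElem_range]
      rw [List.getElem_append]
      by_cases hL : k < (List.replicate left.toNat (none : Option String)).length
      · rw [dif_pos hL]
        simp only [List.length_replicate] at hL
        rw [List.getElem_replicate, if_neg (by omega)]
      · rw [dif_neg hL]
        simp only [List.length_replicate] at hL ⊢
        rw [List.getElem_append]
        by_cases hV : k - left.toNat < ((xs.drop lo.toNat).take (hi.toNat - lo.toNat)).length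
        · rw [dif_pos hV]
          rw [hvlen] at hV
          rw [List.getElem_take, List.getElem_drop]
          rw [if_pos (by omega)]
          rw [PySem.List.pyGetD_eq_getElem xs none (by omega) (by omega)]
          have hidx : lo.toNat + (k - left.toNat) = (start + (k : Int)).toNat := by omega
          simp only [hidx]
        · rw [dif_neg hV]
          rw [hvlen] at hV
          rw [List.getElem_replicate, if_neg (by omega)]
  · -- empty overlap: every requested index is out of range
    rw [if_neg hval]
    simp only [List.append_nil, List.length_nil, Nat.cast_zero]
    apply List.ext_getElem
    · simp only [List.length_map, List.length_range, List.length_append,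
        List.length_replicate]
      omega
    · intro k hk1 hk2
      simp only [List.length_map, List.length_range] at hk1
      simp only [List.getElem_map, List.getElem_range]
      rw [List.getElem_append]
      by_cases hL : k < (List.replicate left.toNat (none : Option String)).length
      · rw [dif_pos hL]
        simp only [List.length_replicate] at hL
        rw [List.getElem_replicate, if_neg (by omega)]
      · rw [dif_neg hL]
        simp only [List.length_replicate] at hL
        rw [List.getElem_replicate, if_neg (by omega)]

-- ===== VERDICT (by name: the statement is the Claim_ definition above) =====
theorem slice_lyrics_beats_py_spec : Claim_equal_slice_lyrics_beats_py := by
  intro xs start length _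
  unfold Spec_slice_lyrics_beats_py
  by_cases h : length ≤ 0
  · have hA : slice_lyrics_beats_py xs start length = [] := by
      simp [slice_lyrics_beats_py, PySem.List.pyRange, show ¬ (0:Int) < length by omega]
    have hB : slice_lyrics_beats_py_alt xs start length = [] := by
      simp [slice_lyrics_beats_py_alt, h]
    rw [hA, hB]
  · obtain ⟨m, rfl⟩ : ∃ m : Nat, length = (m : Int) := ⟨length.toNat, by omega⟩
    exact slice_spec_aux xs start m
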